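-- pv_equiv track=rewrite | github.com/aflavinhams/RA1_7 | functions/parseexpressao.py | estadoNumero
-- ===== SOURCE A (Python) =====
-- def estadoNumero(linha, i):
--
--   # inicio o numero sem nada
--   numero = ''
--   # inicio um contador de pontos como false
--   ponto = False
--
--   # percorro toda a linha a partir da posicao que recebi de parametro
--   while i < len(linha):
--
--     # pego o char da posicao atual
--     c = linha[i]
--
--     # se for um numero
--     if c.isdigit():
--
--       # acrescento ao numero e ando uma posicao
--       numero += c
--       i += 1
--
--     # se for um ponto
--     elif c == '.':
--
--       # se ponto ja for true significa que tem mais de um, retorna erro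
--       if ponto:
--         raise ValueError("Ponto repetido")
--
--       # define ponto como true, acrescenta ao numero e anda uma posicao
--       ponto = True
--       numero += c
--       i += 1
--
--     # se nao for numero nem ponto da um break no while
--     else:
--       break
--
--   return numero, i
-- ===== SOURCE B (Python) =====
-- def estadoNumero(linha, i):
--     # find the extent of the digit/dot run first, then validate the dot count once
--     n = len(linha)
--     j = i
--     while j < n and (linha[j].isdigit() or linha[j] == '.'):
--         j += 1
--     token = linha[i:j]
--     if token.count('.') > 1:
--         raise ValueError("Ponto repetido")
--     return token, j
-- ===== Notes on version B (the rewrite author's own statement) =====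
-- stated objective: simpler
-- what changed: B replaces A's char-by-char accumulation with inline dot tracking by a find-extent index scan followed by one slice and one count('.') validation pass.
-- outside the precondition, e.g. on estadoNumero('12', -1): A returns ('212', 2), B returns ('2', 2)
import Mathlib
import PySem

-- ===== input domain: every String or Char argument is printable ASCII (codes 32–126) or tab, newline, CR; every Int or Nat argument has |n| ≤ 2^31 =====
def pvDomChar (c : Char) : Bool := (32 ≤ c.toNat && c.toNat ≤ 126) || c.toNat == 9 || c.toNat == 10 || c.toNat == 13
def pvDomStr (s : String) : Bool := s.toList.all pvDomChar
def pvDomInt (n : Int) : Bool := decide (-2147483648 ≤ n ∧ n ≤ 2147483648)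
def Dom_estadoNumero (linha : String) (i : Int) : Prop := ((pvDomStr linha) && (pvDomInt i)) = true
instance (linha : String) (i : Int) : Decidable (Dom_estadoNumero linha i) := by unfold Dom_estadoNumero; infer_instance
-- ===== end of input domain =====

-- B replaces A's char-by-char accumulation (with inline dot tracking) by a find-extent
-- index scan, one slice, and a single count('.') validation pass (objective: simpler).

-- ===== PORT A =====
-- while loop of A, fuel-guarded for totality only; 2*len+1 bounds the number of
-- iterations (i starts no lower than -len on non-raising runs).
def goA (cs : List Char) (fuel : Nat) (numero : List Char) (ponto : Bool) (i : Int) :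
    List Char × Int :=
  match fuel with
  | 0 => (numero, i)
  | fuel + 1 =>
    if i < (cs.length : Int) then
      match PySem.List.pyGet? cs i with
      | none => (numero, i)            -- Python raises IndexError here; excluded by Pre_
      | some c =>
        if PySem.Chars.isdigit c then goA cs fuel (numero ++ [c]) ponto (i + 1)
        else if c = '.' then
          if ponto then (numero, i)    -- Python raises ValueError "Ponto repetido"; excluded by Pre_
          else goA cs fuel (numero ++ [c]) true (i + 1)
        else (numero, i)
    else (numero, i)

def estadoNumero (linha : String) (i : Int) : String × Int :=
  let cs := linha.toList
  let r := goA cs (2 * cs.length + 1) [] false i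
  (String.ofList r.1, r.2)

-- ===== PORT B =====
def numTok (c : Char) : Bool := PySem.Chars.isdigit c || c = '.'

-- extent scan of Source B: advance j while linha[j] is a digit or '.'
def goB (cs : List Char) (fuel : Nat) (j : Int) : Int :=
  match fuel with
  | 0 => j
  | fuel + 1 =>
    if j < (cs.length : Int) then
      match PySem.List.pyGet? cs j with
      | none => j                      -- Python raises IndexError here; excluded by Pre_
      | some c => if numTok c then goB cs fuel (j + 1) else j
    else j

def estadoNumero_alt (linha : String) (i : Int) : String × Int :=
  let cs := linha.toList
  let j := goB cs (2 * cs.length + 1) i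
  let token := PySem.List.slice cs (some i) (some j)
  -- Source B raises ValueError here when token.count('.') > 1; excluded by Pre_
  (String.ofList token, j)

-- ===== PRECONDITION & SPEC =====
-- Pre_ excludes (a) negative i — outside the tokenizer's natural domain: A either raises
-- IndexError (i < -len) or returns a negative-index wraparound artefact — and (b) inputs
-- whose digit/dot run starting at i contains more than one '.', on which both A and B
-- raise ValueError("Ponto repetido").
def Pre_estadoNumero (linha : String) (i : Int) : Prop :=
  0 ≤ i ∧ ((linha.toList.drop i.toNat).takeWhile numTok).count '.' ≤ 1
instance (linha : String) (i : Int) : Decidable (Pre_estadoNumero linha i) := by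
  unfold Pre_estadoNumero; infer_instance

def pvWitness_estadoNumero : String × Int := ("x 12.5+7", 2)

def Spec_estadoNumero (linha : String) (i : Int) (out : String × Int) : Prop := out = estadoNumero_alt linha i
instance (linha : String) (i : Int) (out : String × Int) : Decidable (Spec_estadoNumero linha i out) := by unfold Spec_estadoNumero; infer_instance

-- ===== CLAIM (what is proved, stated in full; the proofs are below) =====
def Claim_equal_estadoNumero : Prop := ∀ (linha : String) (i : Int), Dom_estadoNumero linha i → Pre_estadoNumero linha i → Spec_estadoNumero linha i (estadoNumero linha i)

-- ===== LEMMAS AND PROOFS =====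

lemma takeWhile_drop_lt {cs : List Char} {k : Nat} (h : k < cs.length) :
    (cs.drop k).takeWhile numTok =
      if numTok cs[k] then cs[k] :: (cs.drop (k + 1)).takeWhile numTok else [] := by
  rw [List.drop_eq_getElem_cons h, List.takeWhile_cons]

lemma goB_spec (cs : List Char) : ∀ (fuel : Nat) (k : Nat),
    ((cs.drop k).takeWhile numTok).length + 1 ≤ fuel →
    goB cs fuel (k : Int) = (k : Int) + ((cs.drop k).takeWhile numTok).length := by
  intro fuel
  induction fuel with
  | zero => intro k h; omega
  | succ fuel ih =>
    intro k hfuel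
    by_cases hk : k < cs.length
    · have hget : PySem.List.pyGet? cs (k : Int) = some cs[k] := by
        simp [PySem.List.pyGet?_natCast, List.getElem?_eq_getElem hk]
      rw [takeWhile_drop_lt hk] at hfuel ⊢
      simp only [goB, hget, if_pos (show (k : Int) < (cs.length : Int) by exact_mod_cast hk)]
      by_cases hc : numTok cs[k]
      · simp only [hc, if_true, List.length_cons] at hfuel ⊢
        have hcast : ((k : Int) + 1) = ((k + 1 : Nat) : Int) := by push_cast; ring
        rw [hcast, ih (k + 1) (by omega)]
        push_cast; ring
      · simp [hc]
    · have hk' : ¬ ((k : Int) < (cs.length : Int)) := by exact_mod_cast hk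
      have hd : cs.drop k = [] := List.drop_eq_nil_of_le (by omega)
      simp only [goB, if_neg hk', hd, List.takeWhile_nil, List.length_nil]
      simp

lemma goA_spec (cs : List Char) : ∀ (fuel : Nat) (k : Nat) (numero : List Char) (ponto : Bool),
    ((cs.drop k).takeWhile numTok).length + 1 ≤ fuel →
    ((cs.drop k).takeWhile numTok).count '.' + (if ponto then 1 else 0) ≤ 1 →
    goA cs fuel numero ponto (k : Int) =
      (numero ++ (cs.drop k).takeWhile numTok,
       (k : Int) + ((cs.drop k).takeWhile numTok).length) := by
  intro fuel
  induction fuel with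
  | zero => intro k _ _ h _; omega
  | succ fuel ih =>
    intro k numero ponto hfuel hdots
    by_cases hk : k < cs.length
    · have hget : PySem.List.pyGet? cs (k : Int) = some cs[k] := by
        simp [PySem.List.pyGet?_natCast, List.getElem?_eq_getElem hk]
      rw [takeWhile_drop_lt hk] at hfuel hdots ⊢
      simp only [goA, hget, if_pos (show (k : Int) < (cs.length : Int) by exact_mod_cast hk)]
      have hcast : ((k : Int) + 1) = ((k + 1 : Nat) : Int) := by push_cast; ring
      by_cases hdig : PySem.Chars.isdigit cs[k]
      · have hnt : numTok cs[k] = true := by simp [numTok, hdig]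
        simp only [hnt, if_true, List.length_cons] at hfuel hdots ⊢
        have hcne : cs[k] ≠ '.' := by
          intro h; rw [h] at hdig; exact absurd hdig (by decide)
        rw [if_pos hdig, hcast,
          ih (k + 1) (numero ++ [cs[k]]) ponto (by omega)
            (by simpa [List.count_cons, hcne] using hdots)]
        simp only [Prod.mk.injEq]
        constructor
        · simp
        · push_cast; ring
      · rw [if_neg hdig]
        by_cases hdot : cs[k] = '.'
        · have hnt : numTok cs[k] = true := by simp [numTok, hdot]
          simp only [hnt, if_true, List.length_cons] at hfuel hdots ⊢
          have hpf : ponto = false := by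
            rcases ponto with _ | _
            · rfl
            · simp [hdot] at hdots
          subst hpf
          have h0 : ((cs.drop (k + 1)).takeWhile numTok).count '.' + 1 ≤ 1 := by
            simp [hdot] at hdots ⊢; omega
          rw [if_pos hdot, if_neg (by simp), hcast,
            ih (k + 1) (numero ++ [cs[k]]) true (by omega) (by simpa using h0)]
          simp only [Prod.mk.injEq]
          constructor
          · simp
          · push_cast; ring
        · have hnt : numTok cs[k] = false := by simp [numTok, hdig, hdot]
          simp only [hnt] at hfuel hdots ⊢
          simp [if_neg hdot]
    · have hk' : ¬ ((k : Int) < (cs.length : Int)) := by exact_mod_cast hk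
      have hd : cs.drop k = [] := List.drop_eq_nil_of_le (by omega)
      simp only [goA, if_neg hk', hd, List.takeWhile_nil, List.length_nil]
      simp

-- ===== VERDICT (by name: the statement is the Claim_ definition above) =====
theorem estadoNumero_spec : Claim_equal_estadoNumero := by
  intro linha i _ hpre
  obtain ⟨hi, hdots⟩ := hpre
  have hik : i = ((i.toNat : Nat) : Int) := (Int.toNat_of_nonneg hi).symm
  unfold Spec_estadoNumero estadoNumero estadoNumero_alt
  dsimp only
  rw [hik]
  set cs := linha.toList with hcs
  set k := i.toNat with hk
  set t := (cs.drop k).takeWhile numTok with ht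
  have hlen : t.length ≤ cs.length := by
    calc t.length ≤ (cs.drop k).length := (List.takeWhile_prefix numTok).length_le
      _ ≤ cs.length := by simp
  have hfuel : t.length + 1 ≤ 2 * cs.length + 1 := by omega
  rw [goA_spec cs _ k [] false hfuel (by simpa using hdots), goB_spec cs _ k hfuel]
  have hslice : PySem.List.slice cs (some (k : Int)) (some ((k : Int) + (t.length : Int)))
      = (cs.drop k).take t.length := PySem.List.slice_natCast_add cs k t.length
  have htake : (cs.drop k).take t.length = t :=
    (List.prefix_iff_eq_take.mp (List.takeWhile_prefix numTok)).symm
  rw [hslice, htake]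
  simp [ht]
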